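-- pv_equiv track=rewrite | github.com/Data-Science-Link/the_depositum | data_engineering/scripts/post_process_qc_douay_rheims_dummy_verse_repair.py | _has_gap
-- ===== SOURCE A (Python) =====
-- from typing import Any, Dict, List, Optional, Sequence, Tuple
--
-- def _has_gap(verse_nums: Sequence[int]) -> Tuple[int, int]:
--     uniq = sorted(set(verse_nums))
--     gap_events = 0
--     missing_total = 0
--     for a, b in zip(uniq, uniq[1:]):
--         if b - a > 1:
--             gap_events += 1
--             missing_total += b - a - 1
--     return gap_events, missing_total
-- ===== SOURCE B (Python) =====
-- from typing import Sequence, Tuple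
--
-- def _has_gap(verse_nums: Sequence[int]) -> Tuple[int, int]:
--     s = set(verse_nums)
--     if not s:
--         return 0, 0
--     run_starts = sum(1 for x in s if x - 1 not in s)
--     missing = max(s) - min(s) + 1 - len(s)
--     return run_starts - 1, missing
-- ===== Notes on version B (the rewrite author's own statement) =====
-- stated objective: alternative
-- what changed: Replaces sort-then-scan-adjacent-pairs with set arithmetic: gap events = number of run starts (x in set with x-1 not in set) minus 1, and missing total = max - min + 1 - |set|, so no sorting is needed.
import Mathlib
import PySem

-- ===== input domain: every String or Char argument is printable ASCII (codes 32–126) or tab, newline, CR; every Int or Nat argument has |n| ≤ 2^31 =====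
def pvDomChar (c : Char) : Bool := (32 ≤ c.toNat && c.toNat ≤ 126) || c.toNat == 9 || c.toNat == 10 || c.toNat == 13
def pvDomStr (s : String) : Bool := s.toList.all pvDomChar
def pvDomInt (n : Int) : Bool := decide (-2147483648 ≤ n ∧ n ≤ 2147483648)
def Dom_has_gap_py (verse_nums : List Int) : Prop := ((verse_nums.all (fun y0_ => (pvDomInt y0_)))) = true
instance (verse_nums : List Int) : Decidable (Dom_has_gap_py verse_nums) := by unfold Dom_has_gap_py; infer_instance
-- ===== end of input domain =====

-- B replaces A's sort-then-scan with set arithmetic (run starts and max-min-size): a different algorithm that needs no sort.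

-- ===== PORT A =====
-- literal port of A: uniq = sorted(set(verse_nums)); scan adjacent pairs zip(uniq, uniq[1:])
def has_gap_py (verse_nums : List Int) : Int × Int :=
  let uniq := PySem.List.sorted (PySem.Set.ofList verse_nums) (fun y => y) false
  (uniq.zip (PySem.List.slice uniq (some 1) none)).foldl
    (fun (acc : Int × Int) p =>
      if p.2 - p.1 > 1 then (acc.1 + 1, acc.2 + (p.2 - p.1 - 1)) else acc)
    (0, 0)

-- ===== PORT B =====
-- literal port of B: s = set(verse_nums); run starts = count of x with x-1 not in s;
-- missing = max(s) - min(s) + 1 - len(s)  (max/min ported as their running-fold meaning)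
def has_gap_py_alt (verse_nums : List Int) : Int × Int :=
  match PySem.Set.ofList verse_nums with
  | [] => (0, 0)
  | x :: t =>
      let s : PySem.Set Int := x :: t
      let runStarts : Int := (s.countP (fun y => !(PySem.Set.contains s (y - 1))) : Nat)
      let missing : Int := (t.foldl max x) - (t.foldl min x) + 1 - (s.length : Int)
      (runStarts - 1, missing)

-- ===== PRECONDITION & SPEC =====
def Spec_has_gap_py (verse_nums : List Int) (out : Int × Int) : Prop := out = has_gap_py_alt verse_nums
instance (verse_nums : List Int) (out : Int × Int) : Decidable (Spec_has_gap_py verse_nums out) := by unfold Spec_has_gap_py; infer_instance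

-- ===== CLAIM (what is proved, stated in full; the proofs are below) =====
def Claim_equal_has_gap_py : Prop := ∀ (verse_nums : List Int), Dom_has_gap_py verse_nums → Spec_has_gap_py verse_nums (has_gap_py verse_nums)

-- ===== LEMMAS AND PROOFS =====

-- number of adjacent gaps in a list (A's gap_events on the sorted unique list)
def cntG : List Int → Nat
  | [] => 0
  | [_] => 0
  | a :: b :: t => (if b - a > 1 then 1 else 0) + cntG (b :: t)

-- sum of adjacent gap sizes (A's missing_total on the sorted unique list)
def sumG : List Int → Int
  | [] => 0
  | [_] => 0
  | a :: b :: t => (if b - a > 1 then b - a - 1 else 0) + sumG (b :: t)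

lemma foldA (u : List Int) : ∀ (g m : Int),
    (u.zip u.tail).foldl
      (fun (acc : Int × Int) p =>
        if p.2 - p.1 > 1 then (acc.1 + 1, acc.2 + (p.2 - p.1 - 1)) else acc)
      (g, m) = (g + (cntG u : Nat), m + sumG u) := by
  induction u with
  | nil => intro g m; simp [cntG, sumG]
  | cons a t ih =>
    intro g m
    cases t with
    | nil => simp [cntG, sumG]
    | cons b t' =>
      simp only [List.tail_cons, List.zip_cons_cons, List.foldl_cons]
      simp only [List.tail_cons] at ih
      by_cases h : b - a > 1
      · rw [if_pos h, ih (g + 1) (m + (b - a - 1))]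
        simp only [cntG, sumG, if_pos h, Prod.mk.injEq]
        constructor <;> push_cast <;> ring
      · rw [if_neg h, ih g m]
        simp only [cntG, sumG, if_neg h, Prod.mk.injEq]
        constructor <;> push_cast <;> ring

lemma sumG_chain : ∀ (t : List Int) (x : Int), (x :: t).Pairwise (· < ·) →
    sumG (x :: t) = (x :: t).getLast (List.cons_ne_nil x t) - x - t.length := by
  intro t
  induction t with
  | nil => intro x _; simp [sumG]
  | cons b t' ih =>
    intro x hp
    have hxb : x < b := (List.pairwise_cons.mp hp).1 b (List.mem_cons_self)
    have hp' : (b :: t').Pairwise (· < ·) := (List.pairwise_cons.mp hp).2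
    have hlast : (x :: b :: t').getLast (List.cons_ne_nil x (b :: t'))
        = (b :: t').getLast (List.cons_ne_nil b t') := by
      simp [List.getLast_cons]
    rw [hlast]
    have := ih b hp'
    simp only [sumG] at this ⊢
    rw [this]
    simp only [List.length_cons]
    by_cases h : b - x > 1
    · simp only [if_pos h]; push_cast; ring
    · simp only [if_neg h]; push_cast; omega

lemma chain_le_getLast : ∀ (u : List Int) (hne : u ≠ []), u.Pairwise (· < ·) →
    ∀ y ∈ u, y ≤ u.getLast hne := by
  intro u
  induction u with
  | nil => intro hne; exact absurd rfl hne
  | cons a t ih =>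
    intro _ hp y hy
    cases t with
    | nil => simp_all
    | cons b t' =>
      have hp' : (b :: t').Pairwise (· < ·) := (List.pairwise_cons.mp hp).2
      have hlast : (a :: b :: t').getLast (List.cons_ne_nil a (b :: t'))
          = (b :: t').getLast (List.cons_ne_nil b t') := by
        simp [List.getLast_cons]
      rw [hlast]
      rcases List.mem_cons.mp hy with rfl | hy'
      · have hab : y < b := (List.pairwise_cons.mp hp).1 b (List.mem_cons_self)
        have := ih (List.cons_ne_nil b t') hp' b (List.mem_cons_self)
        omega
      · exact ih (List.cons_ne_nil b t') hp' y hy'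

lemma chain_head_le : ∀ (t : List Int) (x : Int), (x :: t).Pairwise (· < ·) →
    ∀ y ∈ x :: t, x ≤ y := by
  intro t x hp y hy
  rcases List.mem_cons.mp hy with rfl | hy'
  · exact le_refl y
  · exact le_of_lt ((List.pairwise_cons.mp hp).1 y hy')

-- run-start count on a strictly increasing nonempty list = 1 + number of adjacent gaps
lemma runStarts_chain : ∀ (u : List Int), u.Pairwise (· < ·) → u ≠ [] →
    u.countP (fun y => !(decide ((y - 1) ∈ u))) = cntG u + 1 := by
  intro u
  induction u with
  | nil => intro _ h; exact absurd rfl h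
  | cons x t ih =>
    intro hp _
    have hxlt : ∀ y ∈ t, x < y := (List.pairwise_cons.mp hp).1
    have hp' : t.Pairwise (· < ·) := (List.pairwise_cons.mp hp).2
    cases t with
    | nil =>
      simp only [List.countP_cons, List.countP_nil, cntG]
      have : ¬ (x - 1 ∈ [x]) := by simp only [List.mem_singleton]; omega
      simp [this]
    | cons b t' =>
      have hxb : x < b := hxlt b (List.mem_cons_self)
      have hblt : ∀ y ∈ t', b < y := (List.pairwise_cons.mp hp').1
      -- head x is always a run start
      have hx1 : ¬ (x - 1 ∈ x :: b :: t') := by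
        intro h
        rcases List.mem_cons.mp h with h' | h'
        · omega
        · have := hxlt _ h'; omega
      -- for y ∈ t', membership of y-1 in the full list and in the tail list agree
      have hagree : ∀ y ∈ t',
          (fun y => !(decide ((y - 1) ∈ x :: b :: t')) : Int → Bool) y = true ↔
          (fun y => !(decide ((y - 1) ∈ b :: t')) : Int → Bool) y = true := by
        intro y hy
        have hyb : b < y := hblt y hy
        simp only [Bool.not_eq_eq_eq_not, Bool.not_true, decide_eq_false_iff_not]
        constructor
        · intro h h'; exact h (List.mem_cons_of_mem x h')
        · intro h h'
          rcases List.mem_cons.mp h' with h'' | h''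
          · omega
          · exact h h''
      have hcongr : t'.countP (fun y => !(decide ((y - 1) ∈ x :: b :: t')))
          = t'.countP (fun y => !(decide ((y - 1) ∈ b :: t'))) :=
        List.countP_congr hagree
      -- b's predicate in the full list: b-1 ∈ full ↔ b = x+1
      have hbfull : ((b - 1) ∈ x :: b :: t') ↔ b = x + 1 := by
        constructor
        · intro h
          rcases List.mem_cons.mp h with h' | h'
          · omega
          · rcases List.mem_cons.mp h' with h'' | h''
            · omega
            · have := hblt _ h''; omega
        · intro h; rw [h]; simp
      have hbtail : ¬ ((b - 1) ∈ b :: t') := by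
        intro h
        rcases List.mem_cons.mp h with h' | h'
        · omega
        · have := hblt _ h'; omega
      have hih := ih hp' (List.cons_ne_nil b t')
      simp only [List.countP_cons] at hih ⊢
      rw [hcongr]
      simp only [hbtail, decide_false, Bool.not_false, if_true] at hih
      simp only [decide_eq_false hx1, Bool.not_false, if_true, hbfull]
      simp only [cntG]
      by_cases hgap : b - x > 1
      · have hne : ¬ (b = x + 1) := by omega
        simp only [hne, decide_false, Bool.not_false, if_true, if_pos hgap]
        omega
      · have heq : b = x + 1 := by omega
        subst heq
        simp only [if_neg hgap]
        simp at hih ⊢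
        omega

theorem has_gap_py_equal (verse_nums : List Int) :
    has_gap_py verse_nums = has_gap_py_alt verse_nums := by
  rcases hs : PySem.Set.ofList verse_nums with _ | ⟨x, t⟩
  · simp [has_gap_py, has_gap_py_alt, hs, PySem.List.sorted]
  · -- nonempty set: u = sorted(set(vs)) is a strictly increasing rearrangement of x :: t
    have hpair : (PySem.List.sorted (PySem.Set.ofList verse_nums) (fun y => y) false).Pairwise (· < ·) :=
      PySem.List.sorted_ofList_pairwise_lt verse_nums
    have hperm : (PySem.List.sorted (PySem.Set.ofList verse_nums) (fun y => y) false).Perm (x :: t) := by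
      rw [← hs]; exact PySem.List.sorted_perm _ _ _
    obtain ⟨h0, r, hur⟩ : ∃ h0 r,
        PySem.List.sorted (PySem.Set.ofList verse_nums) (fun y => y) false = h0 :: r := by
      cases hup : PySem.List.sorted (PySem.Set.ofList verse_nums) (fun y => y) false with
      | nil =>
        exfalso
        have := (PySem.List.sorted_eq_nil_iff _ _ _).mp hup
        rw [hs] at this
        exact List.cons_ne_nil x t this
      | cons a b => exact ⟨a, b, rfl⟩
    rw [hur] at hpair hperm
    -- A's value
    have hA : has_gap_py verse_nums = (((cntG (h0 :: r) : Nat) : Int), sumG (h0 :: r)) := by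
      simp only [has_gap_py, hur, PySem.List.slice_from_one, List.tail_cons]
      have hf := foldA (h0 :: r) 0 0
      simp only [List.tail_cons] at hf
      rw [hf]
      simp
    have hmemiff : ∀ y, y ∈ x :: t ↔ y ∈ h0 :: r := fun y => (hperm.mem_iff).symm
    -- min(s) is the head of the sorted list
    have hminfold : PySem.List.min? (x :: t) (fun y => y) = some (t.foldl min x) :=
      PySem.List.min?_id_cons x t
    have hmaxfold : PySem.List.max? (x :: t) (fun y => y) = some (t.foldl max x) :=
      PySem.List.max?_id_cons x t
    have hmin : t.foldl min x = h0 := by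
      have hmem : t.foldl min x ∈ x :: t := PySem.List.min?_mem hminfold
      have hle : ∀ y ∈ x :: t, t.foldl min x ≤ y := PySem.List.min?_isMin hminfold
      have h1 : t.foldl min x ≤ h0 :=
        hle h0 ((hmemiff h0).mpr List.mem_cons_self)
      have h2 : h0 ≤ t.foldl min x :=
        chain_head_le r h0 hpair _ ((hmemiff _).mp hmem)
      omega
    -- max(s) is the last element of the sorted list
    have hmax : t.foldl max x = (h0 :: r).getLast (List.cons_ne_nil h0 r) := by
      have hmem : t.foldl max x ∈ x :: t := PySem.List.max?_mem hmaxfold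
      have hge : ∀ y ∈ x :: t, y ≤ t.foldl max x := PySem.List.max?_isMax hmaxfold
      have h1 : (h0 :: r).getLast (List.cons_ne_nil h0 r) ≤ t.foldl max x :=
        hge _ ((hmemiff _).mpr (List.getLast_mem (List.cons_ne_nil h0 r)))
      have h2 : t.foldl max x ≤ (h0 :: r).getLast (List.cons_ne_nil h0 r) :=
        chain_le_getLast (h0 :: r) (List.cons_ne_nil h0 r) hpair _ ((hmemiff _).mp hmem)
      omega
    -- run-start count over the set = count over the sorted list = cntG + 1
    have hcount : (x :: t).countP (fun y => !(PySem.Set.contains (x :: t) (y - 1)))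
        = cntG (h0 :: r) + 1 := by
      have e1 : (x :: t).countP (fun y => !(PySem.Set.contains (x :: t) (y - 1)))
          = (x :: t).countP (fun y => !(decide ((y - 1) ∈ h0 :: r))) := by
        apply List.countP_congr
        intro y _
        have : PySem.Set.contains (x :: t) (y - 1) = decide ((y - 1) ∈ h0 :: r) := by
          simp only [PySem.Set.contains, ← hmemiff (y - 1)]
          simp
        rw [this]
      rw [e1, hperm.symm.countP_eq]
      exact runStarts_chain (h0 :: r) hpair (List.cons_ne_nil h0 r)
    have hlen : (x :: t).length = (h0 :: r).length := hperm.length_eq.symm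
    -- assemble
    rw [hA]
    simp only [has_gap_py_alt, hs]
    rw [hcount, hmin, hmax]
    simp only [Prod.mk.injEq]
    constructor
    · push_cast; omega
    · rw [sumG_chain r h0 hpair, hlen]
      simp only [List.length_cons]
      push_cast
      ring

-- ===== VERDICT (by name: the statement is the Claim_ definition above) =====
theorem has_gap_py_spec : Claim_equal_has_gap_py := by
  intro verse_nums _
  unfold Spec_has_gap_py
  exact has_gap_py_equal verse_nums
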